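-- pv_equiv track=rewrite | github.com/devforfu/pytorch_lightning_experiments | utils.py | adjacent_pairs
-- ===== SOURCE A (Python) =====
-- def adjacent_pairs(seq: list) -> list:
--     """Makes a list of adjacent pairs from the elements of a sequence.
--
--     Examples:
--     >>> adjacent_pairs([1, 2, 3])
--     [(1, 2), (2, 3)]
--     """
--     seq = iter(seq)
--     try:
--         x, y = next(seq), next(seq)
--     except StopIteration:
--         return []
--     while True:
--         yield x, y
--         try:
--             x, y = y, next(seq)
--         except StopIteration:
--             break
-- ===== SOURCE B (Python) =====
-- def adjacent_pairs(seq: list) -> list: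
--     """Makes a list of adjacent pairs from the elements of a sequence."""
--     items = list(seq)
--     yield from zip(items, items[1:])
-- ===== Notes on version B (the rewrite author's own statement) =====
-- stated objective: idiomatic
-- what changed: Replaced A's stateful next()/try-except iterator machine with materializing the input and yielding zip(items, items[1:]).
import Mathlib
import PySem

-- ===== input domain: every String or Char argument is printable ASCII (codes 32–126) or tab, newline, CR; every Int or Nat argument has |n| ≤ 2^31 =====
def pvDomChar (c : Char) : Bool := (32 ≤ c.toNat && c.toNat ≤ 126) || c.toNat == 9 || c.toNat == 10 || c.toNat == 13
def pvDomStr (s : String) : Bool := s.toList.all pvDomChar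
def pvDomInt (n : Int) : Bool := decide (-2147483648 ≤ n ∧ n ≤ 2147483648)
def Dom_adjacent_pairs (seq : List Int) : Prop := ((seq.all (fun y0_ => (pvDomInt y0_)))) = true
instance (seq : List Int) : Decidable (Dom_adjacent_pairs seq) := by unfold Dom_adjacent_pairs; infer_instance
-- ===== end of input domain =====

-- B replaces A's stateful next()/try-except iterator loop with zip over two offset views of the list (idiomatic).

-- ===== PORT A =====
-- the while-True loop: emit (x, y), then shift x ← y, y ← next element; stop when the iterator is exhausted
def adjacentPairsLoop (x y : Int) (rest : List Int) : List (Int × Int) :=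
  match rest with
  | [] => [(x, y)]
  | z :: r => (x, y) :: adjacentPairsLoop y z r

def adjacent_pairs (seq : List Int) : List (Int × Int) :=
  -- x, y = next(seq), next(seq); StopIteration → []
  match seq with
  | [] => []
  | [_] => []
  | x :: y :: rest => adjacentPairsLoop x y rest

-- ===== PORT B =====
def adjacent_pairs_alt (seq : List Int) : List (Int × Int) :=
  -- zip(items, items[1:])
  List.zip seq (PySem.List.slice seq (some 1) none)

-- ===== PRECONDITION & SPEC =====
def Spec_adjacent_pairs (seq : List Int) (out : List (Int × Int)) : Prop := out = adjacent_pairs_alt seq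
instance (seq : List Int) (out : List (Int × Int)) : Decidable (Spec_adjacent_pairs seq out) := by unfold Spec_adjacent_pairs; infer_instance

-- ===== CLAIM (what is proved, stated in full; the proofs are below) =====
def Claim_equal_adjacent_pairs : Prop := ∀ (seq : List Int), Dom_adjacent_pairs seq → Spec_adjacent_pairs seq (adjacent_pairs seq)

-- ===== LEMMAS AND PROOFS =====
theorem slice_one_len (seq : List Int) : PySem.List.slice seq (some 1) none = seq.drop 1 := by
  simp [PySem.List.slice_from_one]

theorem loop_eq_zip (x y : Int) (rest : List Int) :
    adjacentPairsLoop x y rest = List.zip (x :: y :: rest) (y :: rest) := by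
  induction rest generalizing x y with
  | nil => simp [adjacentPairsLoop]
  | cons z r ih => simp [adjacentPairsLoop, ih, List.zip]

-- ===== VERDICT (by name: the statement is the Claim_ definition above) =====
theorem adjacent_pairs_spec : Claim_equal_adjacent_pairs := by
  intro seq _
  unfold Spec_adjacent_pairs adjacent_pairs_alt
  rw [slice_one_len]
  match seq with
  | [] => rfl
  | [_] => rfl
  | x :: y :: rest => simp [adjacent_pairs, loop_eq_zip]
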